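-- pv_equiv track=rewrite | github.com/kaiohenricunha/algorithms | tp1/5.py | greatestNumberON
-- ===== SOURCE A (Python) =====
-- from collections import Counter
--
-- def greatestNumberON(array):
--     # Count the occurrences of each number
--     counts = Counter(array)
--
--     # Initialize the variable to store the largest unique number
--     max_unique = -1
--
--     # Iterate over the items in the counter
--     for num, count in counts.items():
--         # Check if the number is unique (occurs only once)
--         if count == 1:
--             # Update max_unique if this number is greater
--             if num > max_unique:
--                 max_unique = num
--
--     return max_unique
-- ===== SOURCE B (Python) =====
-- def greatestNumberON(array):
--     # Sort a copy and scan runs of equal adjacent values; a run of length 1 is a unique candidate.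
--     s = sorted(array)
--     max_unique = -1
--     i = 0
--     n = len(s)
--     while i < n:
--         j = i + 1
--         while j < n and s[j] == s[i]:
--             j += 1
--         if j - i == 1 and s[i] > max_unique:
--             max_unique = s[i]
--         i = j
--     return max_unique
-- ===== Notes on version B (the rewrite author's own statement) =====
-- stated objective: alternative
-- what changed: B builds no Counter/dict: it sorts a copy of the input and scans it once, grouping equal adjacent values into runs and taking the maximum over values whose run has length exactly 1 (seeded with -1, as in A).
import Mathlib
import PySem

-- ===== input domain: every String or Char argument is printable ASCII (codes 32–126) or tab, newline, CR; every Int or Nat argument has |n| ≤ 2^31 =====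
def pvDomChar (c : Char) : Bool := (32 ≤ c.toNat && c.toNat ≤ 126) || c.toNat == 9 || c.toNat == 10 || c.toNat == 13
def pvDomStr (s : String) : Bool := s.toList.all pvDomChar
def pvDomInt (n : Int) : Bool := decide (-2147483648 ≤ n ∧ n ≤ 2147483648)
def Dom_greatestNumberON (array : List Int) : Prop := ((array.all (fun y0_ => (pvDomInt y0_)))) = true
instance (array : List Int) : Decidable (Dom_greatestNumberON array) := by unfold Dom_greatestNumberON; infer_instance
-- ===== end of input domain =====

-- B replaces A's Counter dictionary by a single scan over a sorted copy of the input
-- (runs of equal adjacent values; a run of length 1 is a unique candidate); objective: alternative algorithm, same task, return value proved equal.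

-- ===== PORT A =====
-- Counter(array); then fold over its items keeping the largest key whose count is 1, seeded -1.
def greatestNumberON (array : List Int) : Int :=
  let counts := PySem.Dict.counter array
  counts.items.foldl
    (fun maxUnique p => if p.2 == 1 then (if p.1 > maxUnique then p.1 else maxUnique) else maxUnique)
    (-1)

-- ===== PORT B =====
-- The outer while of Source B advances i run by run; the port carries the remaining suffix s[i:]
-- as its list argument: the inner while advancing j while s[j] == s[i] is takeWhile/dropWhile
-- on the tail of that suffix, and i = j steps to the dropWhile rest.
def pvRunScan (s : List Int) (maxUnique : Int) : Int :=
  match s with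
  | [] => maxUnique
  | x :: t =>
    let run := t.takeWhile (fun y => y == x)
    pvRunScan (t.dropWhile (fun y => y == x))
      (if run.length == 0 && decide (x > maxUnique) then x else maxUnique)
termination_by s.length
decreasing_by
  have h := List.length_dropWhile_le (fun y => y == x) t
  simp only [List.length_cons]; omega

def greatestNumberON_alt (array : List Int) : Int :=
  pvRunScan (PySem.List.sorted array (fun x => x) false) (-1)

-- ===== PRECONDITION & SPEC =====
def Spec_greatestNumberON (array : List Int) (out : Int) : Prop := out = greatestNumberON_alt array
instance (array : List Int) (out : Int) : Decidable (Spec_greatestNumberON array out) := by unfold Spec_greatestNumberON; infer_instance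

-- ===== CLAIM (what is proved, stated in full; the proofs are below) =====
def Claim_equal_greatestNumberON : Prop := ∀ (array : List Int), Dom_greatestNumberON array → Spec_greatestNumberON array (greatestNumberON array)

-- ===== LEMMAS AND PROOFS =====

-- A's fold over Counter items is a running max over the distinct values of count 1.
lemma pvA_eq (array : List Int) :
    greatestNumberON array
      = List.foldl max (-1)
          ((PySem.Set.ofList array).filter (fun v => array.count v == 1)) := by
  show (PySem.Dict.counter array).items.foldl
      (fun maxUnique p => if p.2 == 1 then (if p.1 > maxUnique then p.1 else maxUnique) else maxUnique)
      (-1) = _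
  rw [PySem.Dict.items_counter, List.foldl_map]
  rw [PySem.List.foldl_if_eq_foldl_filter
        (p := fun k => ((array.count k : Int) == 1))
        (f := fun m k => if k > m then k else m)]
  have hp : ∀ k ∈ PySem.Set.ofList array,
      ((array.count k : Int) == 1) = (array.count k == 1) := by
    intro k _; by_cases h : array.count k = 1 <;> simp [h]
  rw [List.filter_congr hp]
  exact PySem.List.foldl_congr_mem _ (fun m k => if k > m then k else m) max _
    (fun acc x _ => by show (if x > acc then x else acc) = max acc x; omega)

-- On a sorted list, B's run scan is a running max over the values of count 1.
lemma pvDropWhile_head_false (p : Int → Bool) (l : List Int) (b : Int) (bs : List Int)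
    (h : l.dropWhile p = b :: bs) : p b = false := by
  induction l with
  | nil => simp [List.dropWhile] at h
  | cons a l ih =>
    rw [List.dropWhile_cons] at h
    by_cases hp : p a
    · exact ih (by simpa [hp] using h)
    · simp only [hp] at h
      cases h
      simpa using hp

lemma pvRunScan_eq (l : List Int) (m : Int) (h : l.Pairwise (· ≤ ·)) :
    pvRunScan l m = List.foldl max m (l.filter (fun v => l.count v == 1)) := by
  induction l, m using pvRunScan.induct with
  | case1 m => simp [pvRunScan]
  | case2 m x t run ih =>
    rw [pvRunScan]
    have hrun_def : run = t.takeWhile (fun y => y == x) := rfl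
    rw [← hrun_def]
    have ht : t.Pairwise (· ≤ ·) := (List.pairwise_cons.mp h).2
    have hx : ∀ y ∈ t, x ≤ y := (List.pairwise_cons.mp h).1
    set rest := t.dropWhile (fun y => y == x) with hrest_def
    have hsplit : run ++ rest = t := List.takeWhile_append_dropWhile
    have hrest_sorted : rest.Pairwise (· ≤ ·) :=
      List.Pairwise.sublist (List.dropWhile_sublist _) ht
    have hrun_eq : ∀ y ∈ run, y = x := fun y hy => by
      have := List.mem_takeWhile_imp hy; simpa using this
    have hrest_gt : ∀ y ∈ rest, x < y := by
      intro y hy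
      cases hrest : rest with
      | nil => rw [hrest] at hy; simp at hy
      | cons b bs =>
        have hw : t.dropWhile (fun y => y == x) = b :: bs := hrest_def.symm.trans hrest
        have hbne : (b == x) = false := pvDropWhile_head_false (fun y => y == x) t b bs hw
        have hb_mem : b ∈ t := (List.dropWhile_sublist _).subset (by rw [hw]; simp)
        have hxb : x < b :=
          lt_of_le_of_ne (hx b hb_mem) (fun he => by simp [← he] at hbne)
        rw [hrest] at hy
        rcases List.mem_cons.mp hy with rfl | hy'
        · exact hxb
        · have : b ≤ y := (List.pairwise_cons.mp (hrest ▸ hrest_sorted)).1 y hy'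
          omega
    have hxnot : x ∉ rest := fun hm => absurd (hrest_gt x hm) (lt_irrefl x)
    have hcx : (x :: t).count x = run.length + 1 := by
      rw [← hsplit, List.count_cons_self, List.count_append,
          List.count_eq_length.mpr (fun b hb => (hrun_eq b hb).symm),
          List.count_eq_zero.mpr hxnot]
    have hcrest : ∀ v ∈ rest, (x :: t).count v = rest.count v := by
      intro v hv
      have hvx : v ≠ x := fun hvx => absurd (hrest_gt v hv) (by rw [hvx]; exact lt_irrefl x)
      have hr0 : run.count v = 0 := List.count_eq_zero.mpr (fun hm => hvx (hrun_eq v hm))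
      rw [← hsplit]
      simp [List.count_append, hr0, Ne.symm hvx]
    have hfilter_rest :
        rest.filter (fun v => (x :: t).count v == 1)
          = rest.filter (fun v => rest.count v == 1) :=
      List.filter_congr (fun v hv => by rw [hcrest v hv])
    by_cases hr : run = []
    · have hteq : rest = t := by rw [← hsplit, hr, List.nil_append]
      have hcond : (run.length == 0 && decide (x > m)) = decide (x > m) := by
        rw [hr]; simp
      have hm' : (if decide (x > m) = true then x else m) = max m x := by
        by_cases hxm : x > m
        · simp only [hxm, decide_true, if_true]; omega
        · simp only [hxm, decide_false, Bool.false_eq_true, if_false]; omega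
      have hpx : ((x :: t).count x == 1) = true := by rw [hcx, hr]; simp
      simp only [dite_eq_ite, hcond, hm', hteq] at ih
      rw [hcond, hm', hteq]
      rw [List.filter_cons, hpx, if_pos rfl, List.foldl_cons]
      rw [hteq] at hfilter_rest
      rw [hfilter_rest]
      exact ih ht
    · have hpx : ((x :: t).count x == 1) = false := by
        rw [hcx]
        simpa [List.length_eq_zero_iff] using hr
      have hrl : (run.length == 0) = false := by
        simpa [List.length_eq_zero_iff] using hr
      have hfr : run.filter (fun v => (x :: t).count v == 1) = [] :=
        List.filter_eq_nil_iff.mpr (fun y hy => by rw [hrun_eq y hy, hpx]; simp)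
      have hcond2 : (run.length == 0 && decide (x > m)) = false := by rw [hrl]; simp
      have hfl : t.filter (fun v => (x :: t).count v == 1)
          = rest.filter (fun v => rest.count v == 1) := by
        have h1 := congrArg (List.filter (fun v => (x :: t).count v == 1)) hsplit.symm
        rw [h1, List.filter_append, hfr, List.nil_append, hfilter_rest]
      rw [List.filter_cons, hpx, hcond2]
      simp only [Bool.false_eq_true, if_false]
      rw [hfl]
      simp only [dite_eq_ite, hcond2, Bool.false_eq_true, if_false] at ih
      exact ih hrest_sorted

lemma pvPerm_filter (array : List Int) :
    ((PySem.List.sorted array (fun x => x) false).filter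
        (fun v => (PySem.List.sorted array (fun x => x) false).count v == 1)).Perm
      ((PySem.Set.ofList array).filter (fun v => array.count v == 1)) := by
  set s := PySem.List.sorted array (fun x => x) false with hs
  have hp : s.Perm array := PySem.List.sorted_perm array (fun x => x) false
  have hc : ∀ v, s.count v = array.count v := fun v => hp.count_eq v
  rw [List.filter_congr (fun v _ => by rw [hc v])]
  rw [List.perm_iff_count]
  intro a
  by_cases ha : array.count a = 1
  · rw [List.count_filter (by simp [ha]), List.count_filter (by simp [ha]), hc a]
    have hmem : a ∈ array := List.count_pos_iff.mp (by omega)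
    rw [List.count_eq_one_of_mem (PySem.Set.nodup_ofList array)
          ((PySem.Set.mem_ofList array a).mpr hmem), ha]
  · have h1 : a ∉ s.filter (fun v => array.count v == 1) := by
      simp [List.mem_filter, ha]
    have h2 : a ∉ (PySem.Set.ofList array).filter (fun v => array.count v == 1) := by
      simp [List.mem_filter, ha]
    rw [List.count_eq_zero.mpr h1, List.count_eq_zero.mpr h2]

-- ===== VERDICT (by name: the statement is the Claim_ definition above) =====
theorem greatestNumberON_spec : Claim_equal_greatestNumberON := by
  intro array _
  unfold Spec_greatestNumberON greatestNumberON_alt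
  rw [pvA_eq, pvRunScan_eq _ _ (PySem.List.sorted_pairwise array (fun x => x))]
  exact (List.Perm.foldl_eq (rcomm := ⟨fun b a₁ a₂ => by omega⟩) (pvPerm_filter array) (-1)).symm
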